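-- pv_equiv track=rewrite | github.com/Tawe/daily-code-challenges | freecodecamp/2026/03/2026-03-05/index.py | smallest_gap
-- ===== SOURCE A (Python) =====
-- def smallest_gap(s):
--     smallest_gap = len(s)
--     smallest_gap_substring = ""
--     gap = 0
--
--     for i in range(len(s)):
--         for j in range(i + 1, len(s)):
--             if s[i] == s[j]:
--                 gap = j - i - 1
--                 if gap < smallest_gap:
--                     smallest_gap = gap
--                     smallest_gap_substring = s[i + 1:j]
--
--     return smallest_gap_substring
-- ===== SOURCE B (Python) =====
-- def smallest_gap(s):
--     best = len(s)
--     out = ""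
--     last = {}
--     for j, c in enumerate(s):
--         if c in last:
--             i = last[c]
--             if j - i - 1 < best:
--                 best = j - i - 1
--                 out = s[i + 1:j]
--         last[c] = j
--     return out
-- ===== Notes on version B (the rewrite author's own statement) =====
-- stated objective: faster
-- what changed: Replaced the all-pairs double loop with a single left-to-right pass that keeps each character's last index in a dict; only adjacent equal-character pairs are candidates, and the minimal gap is always realised by an adjacent pair with the same tie-breaking.
import Mathlib
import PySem

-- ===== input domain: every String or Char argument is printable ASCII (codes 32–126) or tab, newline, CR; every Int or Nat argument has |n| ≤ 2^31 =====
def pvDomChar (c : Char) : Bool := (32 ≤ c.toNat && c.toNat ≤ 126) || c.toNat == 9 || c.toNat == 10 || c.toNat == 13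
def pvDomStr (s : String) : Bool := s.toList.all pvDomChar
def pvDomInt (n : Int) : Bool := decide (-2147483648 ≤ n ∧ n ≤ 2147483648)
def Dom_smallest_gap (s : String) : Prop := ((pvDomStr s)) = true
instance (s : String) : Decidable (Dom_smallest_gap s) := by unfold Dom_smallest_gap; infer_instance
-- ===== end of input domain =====

-- B replaces A's all-pairs double loop by one left-to-right pass keeping each character's
-- last index in a dict (objective: faster, asymptotic O(n^2) → O(n); proved return-value equal).


-- ===== PORT A =====
def smallest_gap (s : String) : String :=
  let l := s.toList
  let n : Int := l.length
  let st :=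
    (PySem.List.pyRange 0 n 1).foldl (fun (st : Int × List Char) i =>
      (PySem.List.pyRange (i + 1) n 1).foldl (fun st j =>
        if PySem.List.pyGetD l i ' ' = PySem.List.pyGetD l j ' ' then
          let gap := j - i - 1
          if gap < st.1 then (gap, PySem.List.slice l (some (i + 1)) (some j)) else st
        else st) st) (n, ([] : List Char))
  String.ofList st.2

-- ===== PORT B =====
def smallest_gap_alt (s : String) : String :=
  let l := s.toList
  let n : Int := l.length
  let st :=
    (PySem.List.enumerate l).foldl
      (fun (st : (Int × List Char) × PySem.Dict Char Int) jc =>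
        let bs :=
          match st.2.get? jc.2 with
          | some i =>
              if jc.1 - i - 1 < st.1.1 then
                (jc.1 - i - 1, PySem.List.slice l (some (i + 1)) (some jc.1))
              else st.1
          | none => st.1
        (bs, st.2.insert jc.2 jc.1)) ((n, ([] : List Char)), PySem.Dict.empty)
  String.ofList st.1.2

-- ===== PRECONDITION & SPEC =====
def Spec_smallest_gap (s : String) (out : String) : Prop := out = smallest_gap_alt s
instance (s : String) (out : String) : Decidable (Spec_smallest_gap s out) := by unfold Spec_smallest_gap; infer_instance

-- ===== CLAIM (what is proved, stated in full; the proofs are below) =====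
def Claim_equal_smallest_gap : Prop := ∀ (s : String), Dom_smallest_gap s → Spec_smallest_gap s (smallest_gap s)

-- ===== LEMMAS AND PROOFS =====

/-- gap of a pair of Nat indices, as an Int (matches Python's `j - i - 1`). -/
def gp (p : Nat × Nat) : Int := (p.2 : Int) - p.1 - 1

/-- the substring between the pair, as both ports compute it via slicing. -/
def subP (l : List Char) (p : Nat × Nat) : List Char := (l.drop (p.1 + 1)).take (p.2 - (p.1 + 1))

/-- the update both programs perform on (best, substring) for a candidate pair. -/
def updF (l : List Char) (st : Int × List Char) (p : Nat × Nat) : Int × List Char :=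
  if gp p < st.1 then (gp p, subP l p) else st

/-- same update, tracking the winning pair instead of its substring. -/
def updP (st : Int × Option (Nat × Nat)) (p : Nat × Nat) : Int × Option (Nat × Nat) :=
  if gp p < st.1 then (gp p, some p) else st

def interp (l : List Char) : Option (Nat × Nat) → List Char
  | none => []
  | some p => subP l p

/-- all equal-character pairs, in A's (i,j)-lexicographic scan order. -/
def LAn (l : List Char) : List (Nat × Nat) :=
  (((List.range l.length).flatMap fun i =>
      (List.range (l.length - (i + 1))).map fun d => (i, i + 1 + d))).filter
    fun p => l.getD p.1 ' ' = l.getD p.2 ' '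

/-- last occurrence of c strictly before position j. -/
def occB (l : List Char) (j : Nat) (c : Char) : Option Nat :=
  ((List.range j).filter fun i => l.getD i ' ' = c).getLast?

/-- the adjacent equal-character pairs, in B's scan order (by j). -/
def LBseg (l : List Char) (k m : Nat) : List (Nat × Nat) :=
  (List.range' k m).filterMap fun j => (occB l j (l.getD j ' ')).map fun i => (i, j)

def LBn (l : List Char) : List (Nat × Nat) := LBseg l 0 l.length

/-- running minimum of gaps. -/
def gmin (L : List (Nat × Nat)) (b : Int) : Int := L.foldl (fun m p => min m (gp p)) b

lemma gmin_nil (b : Int) : gmin [] b = b := rfl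

lemma gmin_cons (a : Nat × Nat) (L : List (Nat × Nat)) (b : Int) :
    gmin (a :: L) b = gmin L (min b (gp a)) := rfl

lemma gmin_le_init (L : List (Nat × Nat)) (b : Int) : gmin L b ≤ b := by
  induction L generalizing b with
  | nil => simp [gmin_nil]
  | cons a L ih =>
    rw [gmin_cons]
    calc gmin L (min b (gp a)) ≤ min b (gp a) := ih _
      _ ≤ b := min_le_left _ _

lemma gmin_le_mem {L : List (Nat × Nat)} {p : Nat × Nat} (h : p ∈ L) (b : Int) :
    gmin L b ≤ gp p := by
  induction L generalizing b with
  | nil => simp at h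
  | cons a L ih =>
    rw [gmin_cons]
    rcases List.mem_cons.mp h with rfl | h
    · calc gmin L (min b (gp p)) ≤ min b (gp p) := gmin_le_init _ _
        _ ≤ gp p := min_le_right _ _
    · exact ih h _

lemma gmin_attained (L : List (Nat × Nat)) (b : Int) :
    gmin L b = b ∨ ∃ p ∈ L, gmin L b = gp p := by
  induction L generalizing b with
  | nil => left; rfl
  | cons a L ih =>
    rw [gmin_cons]
    rcases ih (min b (gp a)) with h | ⟨p, hp, hg⟩
    · rcases min_cases b (gp a) with ⟨hm, _⟩ | ⟨hm, _⟩
      · left; rw [h, hm]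
      · right; exact ⟨a, List.mem_cons_self, by rw [h, hm]⟩
    · right; exact ⟨p, List.mem_cons_of_mem _ hp, hg⟩

lemma find?_eq_none_of_forall {α : Type} {L : List α} {pred : α → Bool}
    (h : ∀ b ∈ L, pred b = false) : L.find? pred = none := by
  exact List.find?_eq_none.mpr fun x hx => by simp [h x hx]

lemma find?_congr_mem {α : Type} {L : List α} {p q : α → Bool}
    (h : ∀ b ∈ L, p b = q b) : L.find? p = L.find? q := by
  induction L with
  | nil => rfl
  | cons a L ih =>
    have ha := h a List.mem_cons_self
    by_cases hp : p a
    · rw [List.find?_cons_of_pos hp, List.find?_cons_of_pos (ha ▸ hp)]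
    · rw [List.find?_cons_of_neg hp, List.find?_cons_of_neg (by rw [← ha]; exact hp)]
      exact ih fun b hb => h b (List.mem_cons_of_mem _ hb)

/-- characterization of the pair-tracking fold: it returns the first pair attaining the
    overall minimum gap, if that improves on the initial best. -/
lemma fold_char (L : List (Nat × Nat)) (b₀ : Int) (w₀ : Option (Nat × Nat)) :
    L.foldl updP (b₀, w₀) =
      match L.find? (fun p => decide (gp p < b₀) && decide (gp p = gmin L b₀)) with
      | none => (b₀, w₀)
      | some p => (gp p, some p) := by
  induction L generalizing b₀ w₀ with
  | nil => rfl
  | cons a L ih =>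
    simp only [List.foldl_cons, updP]
    have hgm : gmin (a :: L) b₀ = gmin L (min b₀ (gp a)) := gmin_cons a L b₀
    by_cases h : gp a < b₀
    · simp only [if_pos h]
      have hmin : min b₀ (gp a) = gp a := min_eq_right (le_of_lt h)
      by_cases ha : gp a = gmin L (gp a)
      · have hfind : (a :: L).find?
            (fun p => decide (gp p < b₀) && decide (gp p = gmin (a :: L) b₀)) = some a := by
          apply List.find?_cons_of_pos
          simp [h, hgm, hmin, ← ha]
        rw [hfind]
        rw [ih (gp a) (some a)]
        have hnone : L.find? (fun p => decide (gp p < gp a) && decide (gp p = gmin L (gp a))) = none := by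
          apply find?_eq_none_of_forall
          intro b hb
          have := gmin_le_mem hb (gp a)
          simp only [Bool.and_eq_false_iff, decide_eq_false_iff_not, not_lt]
          by_cases hba : gp b < gp a
          · right; intro hbeq; rw [← hbeq] at ha; omega
          · left; omega
        rw [hnone]
      · have hlt : gmin L (gp a) < gp a :=
          lt_of_le_of_ne (gmin_le_init _ _) (fun hh => ha hh.symm)
        have hfa : (decide (gp a < b₀) && decide (gp a = gmin (a :: L) b₀)) = false := by
          simp [hgm, hmin]; intro; omega
        rw [List.find?_cons_of_neg (by simp [hfa])]
        rw [ih (gp a) (some a)]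
        have hcong : L.find? (fun p => decide (gp p < gp a) && decide (gp p = gmin L (gp a)))
            = L.find? (fun p => decide (gp p < b₀) && decide (gp p = gmin (a :: L) b₀)) := by
          apply find?_congr_mem
          intro b hb
          simp only [hgm, hmin]
          by_cases hbe : gp b = gmin L (gp a)
          · simp [hbe]; omega
          · simp [hbe]
        rw [hcong]
        obtain ⟨q, hq, hqe⟩ : ∃ q ∈ L, gmin L (gp a) = gp q := by
          rcases gmin_attained L (gp a) with hh | hh
          · omega
          · exact hh
        have hsome : (L.find? (fun p => decide (gp p < b₀) && decide (gp p = gmin (a :: L) b₀))).isSome := by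
          rw [List.find?_isSome]
          exact ⟨q, hq, by simp [hgm, hmin, ← hqe]; omega⟩
        obtain ⟨p, hp⟩ := Option.isSome_iff_exists.mp hsome
        rw [hp]
    · simp only [if_neg h]
      have hmin : min b₀ (gp a) = b₀ := min_eq_left (by omega)
      have hfa : (decide (gp a < b₀) && decide (gp a = gmin (a :: L) b₀)) = false := by
        simp; intro; omega
      rw [List.find?_cons_of_neg (by simp [hfa])]
      rw [ih b₀ w₀]
      have : gmin (a :: L) b₀ = gmin L b₀ := by rw [hgm, hmin]
      rw [this]

/-- firstness: a found element precedes (w.r.t. R) every other satisfying element. -/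
lemma find?_first {α : Type} {R : α → α → Prop} {L : List α} {pred : α → Bool} {a : α}
    (hL : L.Pairwise R) (h : L.find? pred = some a) :
    ∀ b ∈ L, pred b → a = b ∨ R a b := by
  induction L with
  | nil => simp at h
  | cons x L ih =>
    by_cases hx : pred x
    · rw [List.find?_cons_of_pos hx] at h
      have hax : x = a := by injection h
      subst hax
      intro b hb hbp
      rcases List.mem_cons.mp hb with rfl | hb
      · exact Or.inl rfl
      · exact Or.inr ((List.pairwise_cons.mp hL).1 b hb)
    · rw [List.find?_cons_of_neg hx] at h
      intro b hb hbp
      rcases List.mem_cons.mp hb with rfl | hb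
      · exact absurd hbp hx
      · exact ih (List.pairwise_cons.mp hL).2 h b hb hbp

-- membership characterizations
lemma mem_LAn {l : List Char} {p : Nat × Nat} :
    p ∈ LAn l ↔ p.1 < p.2 ∧ p.2 < l.length ∧ l.getD p.1 ' ' = l.getD p.2 ' ' := by
  obtain ⟨i, j⟩ := p
  simp only [LAn, List.mem_filter, List.mem_flatMap, List.mem_map, List.mem_range,
    decide_eq_true_eq]
  constructor
  · rintro ⟨⟨i', hi', d, hd, h⟩, hc⟩
    obtain ⟨rfl, rfl⟩ : i' = i ∧ i' + 1 + d = j := by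
      exact ⟨congrArg Prod.fst h, congrArg Prod.snd h⟩
    exact ⟨by omega, by omega, hc⟩
  · rintro ⟨h1, h2, h3⟩
    exact ⟨⟨i, by omega, j - i - 1, by omega, by simp; omega⟩, h3⟩

lemma occB_succ (l : List Char) (j : Nat) (c : Char) :
    occB l (j + 1) c = if l.getD j ' ' = c then some j else occB l j c := by
  unfold occB
  rw [List.range_succ, List.filter_append]
  by_cases h : l.getD j ' ' = c <;> simp_all [List.getD]

lemma occB_eq_some {l : List Char} {j i : Nat} {c : Char} :
    occB l j c = some i ↔
      i < j ∧ l.getD i ' ' = c ∧ ∀ k, i < k → k < j → l.getD k ' ' ≠ c := by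
  induction j with
  | zero =>
    constructor
    · intro h; simp [occB] at h
    · rintro ⟨h, -⟩; omega
  | succ j ih =>
    rw [occB_succ]
    by_cases hc : l.getD j ' ' = c
    · simp only [if_pos hc]
      constructor
      · rintro h
        obtain rfl : j = i := by injection h
        exact ⟨Nat.lt_succ_self _, hc, fun k hk1 hk2 => by omega⟩
      · rintro ⟨h1, h2, h3⟩
        by_cases hij : i = j
        · subst hij; rfl
        · exact absurd hc (h3 j (by omega) (Nat.lt_succ_self _))
    · simp only [if_neg hc]
      rw [ih]
      constructor
      · rintro ⟨h1, h2, h3⟩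
        refine ⟨by omega, h2, fun k hk1 hk2 => ?_⟩
        by_cases hkj : k = j
        · subst hkj; exact hc
        · exact h3 k hk1 (by omega)
      · rintro ⟨h1, h2, h3⟩
        refine ⟨?_, h2, fun k hk1 hk2 => h3 k hk1 (by omega)⟩
        by_cases hij : i = j
        · subst hij; exact absurd h2 hc
        · omega

lemma occB_eq_none {l : List Char} {j : Nat} {c : Char} :
    occB l j c = none ↔ ∀ k, k < j → l.getD k ' ' ≠ c := by
  induction j with
  | zero => simp [occB]
  | succ j ih =>
    rw [occB_succ]
    by_cases hc : l.getD j ' ' = c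
    · simp only [if_pos hc]
      constructor
      · intro h; cases h
      · intro h; exact absurd hc (h j (Nat.lt_succ_self _))
    · simp only [if_neg hc]
      rw [ih]
      constructor
      · intro h k hk1 hk2
        by_cases hkj : k = j
        · subst hkj; exact hc hk2
        · exact h k (by omega) hk2
      · intro h k hk1
        exact h k (by omega)

lemma mem_LBn {l : List Char} {p : Nat × Nat} :
    p ∈ LBn l ↔ p.2 < l.length ∧ occB l p.2 (l.getD p.2 ' ') = some p.1 := by
  obtain ⟨i, j⟩ := p
  simp only [LBn, LBseg, List.mem_filterMap, List.mem_range', Option.map_eq_some_iff]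
  constructor
  · rintro ⟨j', ⟨⟨k, hk, hj'⟩, i', hocc, h⟩⟩
    obtain ⟨rfl, rfl⟩ : i' = i ∧ j' = j := by
      exact ⟨congrArg Prod.fst h, congrArg Prod.snd h⟩
    exact ⟨by omega, hocc⟩
  · rintro ⟨h1, h2⟩
    exact ⟨j, ⟨⟨j, by omega, by omega⟩, i, h2, rfl⟩⟩

lemma LBn_subset_LAn {l : List Char} {p : Nat × Nat} (h : p ∈ LBn l) : p ∈ LAn l := by
  obtain ⟨h1, h2⟩ := mem_LBn.mp h
  obtain ⟨hij, hc, -⟩ := occB_eq_some.mp h2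
  exact mem_LAn.mpr ⟨hij, h1, hc⟩

lemma dominated {l : List Char} {p : Nat × Nat} (h : p ∈ LAn l) :
    ∃ q ∈ LBn l, gp q ≤ gp p := by
  obtain ⟨i, j⟩ := p
  obtain ⟨h1, h2, h3⟩ := mem_LAn.mp h
  set c := l.getD j ' ' with hc
  obtain ⟨i', hi'⟩ : ∃ i', occB l j c = some i' := by
    rcases ho : occB l j c with _ | i'
    · exact absurd h3 (occB_eq_none.mp ho i h1)
    · exact ⟨i', rfl⟩
  obtain ⟨hij, hchar, hmax⟩ := occB_eq_some.mp hi'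
  refine ⟨(i', j), mem_LBn.mpr ⟨h2, hi'⟩, ?_⟩
  have : i ≤ i' := by
    by_contra hlt
    exact hmax i (by omega) h1 h3
  simp only [gp]
  omega

lemma gmin_eq (l : List Char) :
    gmin (LAn l) (l.length : Int) = gmin (LBn l) (l.length : Int) := by
  apply le_antisymm
  · rcases gmin_attained (LBn l) (l.length : Int) with h | ⟨q, hq, hg⟩
    · rw [h]; exact gmin_le_init _ _
    · rw [hg]; exact gmin_le_mem (LBn_subset_LAn hq) _
  · rcases gmin_attained (LAn l) (l.length : Int) with h | ⟨p, hp, hg⟩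
    · rw [h]; exact gmin_le_init _ _
    · obtain ⟨q, hq, hle⟩ := dominated hp
      rw [hg]
      exact le_trans (gmin_le_mem hq _) hle

lemma pairwise_LAn (l : List Char) :
    (LAn l).Pairwise (fun p q => p.1 < q.1 ∨ (p.1 = q.1 ∧ p.2 < q.2)) := by
  apply List.Pairwise.filter
  rw [List.pairwise_flatMap]
  constructor
  · intro i _
    rw [List.pairwise_map]
    apply List.Pairwise.imp ?_ (List.pairwise_lt_range)
    intro d d' hdd'
    exact Or.inr ⟨rfl, by omega⟩
  · apply List.Pairwise.imp ?_ (List.pairwise_lt_range)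
    intro i i' hii' x hx y hy
    simp only [List.mem_map] at hx hy
    obtain ⟨d, -, rfl⟩ := hx
    obtain ⟨d', -, rfl⟩ := hy
    exact Or.inl hii'

lemma pairwise_LBn (l : List Char) :
    (LBn l).Pairwise (fun p q => p.2 < q.2) := by
  rw [LBn, LBseg, List.pairwise_filterMap]
  apply List.Pairwise.imp ?_ (List.pairwise_lt_range')
  intro j j' hjj' b hb b' hb'
  simp only [Option.map_eq_some_iff] at hb hb'
  obtain ⟨i, -, rfl⟩ := hb
  obtain ⟨i', -, rfl⟩ := hb'
  exact hjj'

/-- a minimal-gap pair of LAn is adjacent, i.e. in LBn. -/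
lemma min_pair_mem_LBn {l : List Char} {p : Nat × Nat} (hp : p ∈ LAn l)
    (hmin : gp p = gmin (LAn l) (l.length : Int)) : p ∈ LBn l := by
  obtain ⟨i, j⟩ := p
  obtain ⟨h1, h2, h3⟩ := mem_LAn.mp hp
  obtain ⟨i', hi'⟩ : ∃ i', occB l j (l.getD j ' ') = some i' := by
    rcases ho : occB l j (l.getD j ' ') with _ | i'
    · exact absurd h3 (occB_eq_none.mp ho i h1)
    · exact ⟨i', rfl⟩
  obtain ⟨hij, hchar, hmax⟩ := occB_eq_some.mp hi'
  have hii' : i ≤ i' := by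
    by_contra hlt
    exact hmax i (by omega) h1 h3
  have heq : i = i' := by
    by_contra hne
    have hmem : (i', j) ∈ LAn l := mem_LAn.mpr ⟨hij, h2, by rw [hchar]⟩
    have := gmin_le_mem hmem (l.length : Int)
    rw [← hmin] at this
    simp only [gp] at this
    omega
  subst heq
  exact mem_LBn.mpr ⟨h2, hi'⟩

/-- the two pair-tracking folds agree. -/
lemma foldP_eq (l : List Char) :
    (LAn l).foldl updP ((l.length : Int), none) =
    (LBn l).foldl updP ((l.length : Int), none) := by
  rw [fold_char, fold_char]
  rcases hA : (LAn l).find?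
      (fun p => decide (gp p < (l.length : Int)) && decide (gp p = gmin (LAn l) (l.length : Int)))
    with _ | pA
  · rcases hB : (LBn l).find?
        (fun p => decide (gp p < (l.length : Int)) && decide (gp p = gmin (LBn l) (l.length : Int)))
      with _ | pB
    · rfl
    · exfalso
      have hmem := List.mem_of_find?_eq_some hB
      have hpred := List.find?_some hB
      have := List.find?_eq_none.mp hA pB (LBn_subset_LAn hmem)
      rw [gmin_eq] at this
      exact this hpred
  · have hmemA := List.mem_of_find?_eq_some hA
    have hpredA := List.find?_some hA
    simp only [Bool.and_eq_true, decide_eq_true_eq] at hpredA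
    have hALB : pA ∈ LBn l := min_pair_mem_LBn hmemA hpredA.2
    have hgB : gp pA = gmin (LBn l) (l.length : Int) := by rw [← gmin_eq]; exact hpredA.2
    have hsome : ((LBn l).find?
        (fun p => decide (gp p < (l.length : Int)) && decide (gp p = gmin (LBn l) (l.length : Int)))).isSome := by
      rw [List.find?_isSome]
      exact ⟨pA, hALB, by simp only [Bool.and_eq_true, decide_eq_true_eq]; exact ⟨hpredA.1, hgB⟩⟩
    obtain ⟨pB, hB⟩ := Option.isSome_iff_exists.mp hsome
    rw [hB]
    have hmemB := List.mem_of_find?_eq_some hB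
    have hpredB := List.find?_some hB
    simp only [Bool.and_eq_true, decide_eq_true_eq] at hpredB
    have hgA : gp pB = gmin (LAn l) (l.length : Int) := by rw [gmin_eq]; exact hpredB.2
    have heq : pA = pB := by
      have h1 := find?_first (pairwise_LAn l) hA pB (LBn_subset_LAn hmemB)
        (by simp only [Bool.and_eq_true, decide_eq_true_eq]; exact ⟨hpredB.1, hgA⟩)
      have h2 := find?_first (pairwise_LBn l) hB pA hALB
        (by simp only [Bool.and_eq_true, decide_eq_true_eq]; exact ⟨hpredA.1, hgB⟩)
      rcases h1 with rfl | h1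
      · rfl
      · rcases h2 with rfl | h2
        · rfl
        · exfalso
          have hg : gp pA = gp pB := by rw [hpredA.2, gmin_eq, ← hpredB.2]
          simp only [gp] at hg
          rcases h1 with h1 | ⟨h1a, h1b⟩ <;> omega
    rw [heq]

/-- the substring-carrying fold is the pair-tracking fold through `interp`. -/
lemma fold_proj (l : List Char) (L : List (Nat × Nat)) (b : Int) (w : Option (Nat × Nat)) :
    L.foldl (updF l) (b, interp l w) =
      (fun st : Int × Option (Nat × Nat) => (st.1, interp l st.2)) (L.foldl updP (b, w)) := by
  induction L generalizing b w with
  | nil => rfl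
  | cons a L ih =>
    simp only [List.foldl_cons, updF, updP]
    by_cases h : gp a < b
    · simp only [if_pos h]
      exact ih (gp a) (some a)
    · simp only [if_neg h]
      exact ih b w

lemma loopA_eq (l : List Char) (st : Int × List Char) :
    (PySem.List.pyRange 0 (l.length : Int) 1).foldl
      (fun (st : Int × List Char) i =>
        (PySem.List.pyRange (i + 1) (l.length : Int) 1).foldl
          (fun st j =>
            if PySem.List.pyGetD l i ' ' = PySem.List.pyGetD l j ' ' then
              if j - i - 1 < st.1 then (j - i - 1, PySem.List.slice l (some (i + 1)) (some j))
              else st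
            else st) st) st
    = (LAn l).foldl (updF l) st := by
  rw [LAn, List.foldl_filter, List.foldl_flatMap, PySem.List.pyRange_zero_nat, List.foldl_map]
  apply PySem.List.foldl_congr_mem
  intro acc i _
  rw [PySem.List.pyRange_one, List.foldl_map, List.foldl_map]
  have harg : ((l.length : Int) - (↑i + 1)).toNat = l.length - (i + 1) := by
    have : ((i : Int) + 1) = ((i + 1 : Nat) : Int) := by push_cast; ring
    rw [this, Int.toNat_sub]
  rw [harg]
  apply PySem.List.foldl_congr_mem
  intro st2 d _
  have hj : ((i : Int) + 1 + (d : Int)) = ((i + 1 + d : Nat) : Int) := by push_cast; ring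
  rw [hj, PySem.List.pyGetD_natCast, PySem.List.pyGetD_natCast]
  by_cases hc : l.getD i ' ' = l.getD (i + 1 + d) ' '
  · have hsl : PySem.List.slice l (some ((i : Int) + 1)) (some ((i + 1 + d : Nat) : Int))
        = (l.drop (i + 1)).take ((i + 1 + d) - (i + 1)) := by
      have h1 : ((i : Int) + 1) = ((i + 1 : Nat) : Int) := by push_cast; ring
      rw [h1, PySem.List.slice_natCast]
    unfold updF gp subP
    rw [hsl]
    simp only [hc, decide_true, if_true]
  · rw [if_neg hc, if_neg (by simpa [List.getD] using hc)]

/-- port A computes the updF-fold over LAn. -/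
lemma portA_eq (s : String) :
    smallest_gap s =
      String.ofList ((LAn s.toList).foldl (updF s.toList)
        ((s.toList.length : Int), ([] : List Char))).2 := by
  show String.ofList ((PySem.List.pyRange 0 (s.toList.length : Int) 1).foldl
      (fun (st : Int × List Char) i =>
        (PySem.List.pyRange (i + 1) (s.toList.length : Int) 1).foldl
          (fun st j =>
            if PySem.List.pyGetD s.toList i ' ' = PySem.List.pyGetD s.toList j ' ' then
              if j - i - 1 < st.1 then
                (j - i - 1, PySem.List.slice s.toList (some (i + 1)) (some j))
              else st
            else st) st) ((s.toList.length : Int), ([] : List Char))).2 = _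
  rw [loopA_eq]

/-- B's loop over the enumerated suffix, given the dict holds the last occurrences
    of the processed prefix, performs the updF-fold over the adjacent pairs of the suffix. -/
lemma foldB_inv (l : List Char) (m : Nat) : ∀ (k : Nat), k + m = l.length →
    ∀ (st : Int × List Char) (d : PySem.Dict Char Int),
    (∀ c, d.get? c = (occB l k c).map (fun i => (i : Int))) →
    ((PySem.List.enumerate (l.drop k) (k : Int)).foldl
      (fun (st : (Int × List Char) × PySem.Dict Char Int) jc =>
        (match st.2.get? jc.2 with
          | some i =>
              if jc.1 - i - 1 < st.1.1 then
                (jc.1 - i - 1, PySem.List.slice l (some (i + 1)) (some jc.1))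
              else st.1
          | none => st.1,
         st.2.insert jc.2 jc.1)) (st, d)).1
      = (LBseg l k m).foldl (updF l) st := by
  induction m with
  | zero =>
    intro k hk st d hd
    rw [List.drop_of_length_le (by omega)]
    rfl
  | succ m ih =>
    intro k hk st d hd
    have hkl : k < l.length := by omega
    rw [List.drop_eq_getElem_cons hkl, PySem.List.enumerate_cons, List.foldl_cons]
    have hgd : l.getD k ' ' = l[k] := List.getD_eq_getElem l ' ' hkl
    have hseg : LBseg l k (m + 1)
        = ((occB l k (l.getD k ' ')).map (fun i => (i, k))).toList ++ LBseg l (k + 1) m := by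
      rw [LBseg, List.range'_succ, List.filterMap_cons]
      rcases ho : occB l k (l.getD k ' ') with _ | i
      · simp [LBseg]
      · simp [LBseg]
    have hd' : ∀ c, ((d.insert l[k] ((k : Nat) : Int)).get? c)
        = (occB l (k + 1) c).map (fun i => (i : Int)) := by
      intro c
      rw [PySem.Dict.get?_insert, occB_succ, hgd]
      by_cases hck : c = l[k]
      · rw [if_pos hck, if_pos hck.symm]; simp
      · rw [if_neg hck, if_neg (fun h => hck h.symm), hd]
    have hnext : (k : Int) + 1 = ((k + 1 : Nat) : Int) := by push_cast; ring
    rcases ho : occB l k (l.getD k ' ') with _ | i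
    · have hget : d.get? l[k] = none := by rw [hd, ← hgd, ho]; rfl
      simp only [hget]
      rw [hseg, ho, hnext]
      simpa using ih (k + 1) (by omega) st _ hd'
    · have hget : d.get? l[k] = some ((i : Nat) : Int) := by rw [hd, ← hgd, ho]; rfl
      simp only [hget]
      rw [hseg, ho, hnext]
      have hstep : (if (k : Int) - (i : Int) - 1 < st.1 then
            ((k : Int) - (i : Int) - 1, PySem.List.slice l (some ((i : Int) + 1)) (some (k : Int)))
          else st) = updF l st (i, k) := by
        unfold updF gp subP
        have h1 : ((i : Int) + 1) = ((i + 1 : Nat) : Int) := by push_cast; ring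
        rw [h1, PySem.List.slice_natCast]
      simp only [Option.map_some, Option.toList_some, List.singleton_append]
      rw [List.foldl_cons, ← hstep]
      exact ih (k + 1) (by omega) _ _ hd'

/-- port B computes the updF-fold over LBn. -/
lemma portB_eq (s : String) :
    smallest_gap_alt s =
      String.ofList ((LBn s.toList).foldl (updF s.toList)
        ((s.toList.length : Int), ([] : List Char))).2 := by
  show String.ofList ((PySem.List.enumerate s.toList).foldl
      (fun (st : (Int × List Char) × PySem.Dict Char Int) jc =>
        (match st.2.get? jc.2 with
          | some i =>
              if jc.1 - i - 1 < st.1.1 then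
                (jc.1 - i - 1, PySem.List.slice s.toList (some (i + 1)) (some jc.1))
              else st.1
          | none => st.1,
         st.2.insert jc.2 jc.1)) (((s.toList.length : Int), ([] : List Char)), PySem.Dict.empty)).1.2 = _
  have h0 : PySem.List.enumerate s.toList (0 : Int)
      = PySem.List.enumerate (s.toList.drop 0) (((0 : Nat) : Int)) := by simp
  have hinv : ∀ c, (PySem.Dict.empty : PySem.Dict Char Int).get? c
      = (occB s.toList 0 c).map (fun i => (i : Int)) := by
    intro c
    rw [PySem.Dict.get?_empty]
    rfl
  have := foldB_inv s.toList s.toList.length 0 (by omega)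
    ((s.toList.length : Int), ([] : List Char)) PySem.Dict.empty hinv
  rw [← h0 ] at this
  rw [show PySem.List.enumerate s.toList = PySem.List.enumerate s.toList (0 : Int) from rfl]
  rw [this]
  rfl

-- ===== VERDICT (by name: the statement is the Claim_ definition above) =====
theorem smallest_gap_spec : Claim_equal_smallest_gap := by
  intro s _
  show smallest_gap s = smallest_gap_alt s
  rw [portA_eq, portB_eq]
  have hA := fold_proj s.toList (LAn s.toList) (s.toList.length : Int) none
  have hB := fold_proj s.toList (LBn s.toList) (s.toList.length : Int) none
  simp only [interp] at hA hB
  rw [hA, hB, foldP_eq]
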